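-- pv_equiv track=rewrite | github.com/umarhunter/pythonpasswordencrypter | main.py | convert2ascii
-- ===== SOURCE A (Python) =====
-- def convert2ascii(string, num):
--     blank = ""
--     for index in range(len(string)):
--         whilevar = ord(string[index]) + num
--         while whilevar > 122:
--             whilevar = whilevar - 26
--         bar = whilevar
--         blank = blank + chr(bar)
--     return blank
-- ===== SOURCE B (Python) =====
-- def convert2ascii(string, num):
--     return "".join(
--         chr(v if v <= 122 else 97 + (v - 97) % 26)
--         for v in (ord(c) + num for c in string)
--     )
-- ===== Notes on version B (the rewrite author's own statement) =====
-- stated objective: faster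
-- what changed: replaces the per-character repeated-subtraction while loop and quadratic string concatenation with a one-shot closed-form modular reduction inside a single join'd comprehension
import Mathlib
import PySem

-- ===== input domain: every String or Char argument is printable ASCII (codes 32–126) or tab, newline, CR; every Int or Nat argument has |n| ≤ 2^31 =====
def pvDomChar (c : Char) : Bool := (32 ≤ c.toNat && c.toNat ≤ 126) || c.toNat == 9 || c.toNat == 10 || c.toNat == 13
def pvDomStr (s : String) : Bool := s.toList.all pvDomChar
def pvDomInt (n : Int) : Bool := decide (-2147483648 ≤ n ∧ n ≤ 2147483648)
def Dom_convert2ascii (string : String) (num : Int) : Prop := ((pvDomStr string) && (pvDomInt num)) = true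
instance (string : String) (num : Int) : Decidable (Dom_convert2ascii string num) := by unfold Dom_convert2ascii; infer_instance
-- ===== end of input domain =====

-- B replaces A's repeated-subtraction while loop and string concatenation by a
-- closed-form modular reduction in a single mapped pass (faster).


-- ===== PORT A =====
-- the 'while whilevar > 122: whilevar = whilevar - 26' loop, verbatim
def pyWhileReduce (v : Int) : Int :=
  if h : v > 122 then pyWhileReduce (v - 26) else v
  termination_by v.toNat
  decreasing_by omega

-- chr(bar): ported by hand as Char.ofNat bar.toNat; exact for 0 ≤ bar ≤ 122,
-- which Pre_ guarantees (Python chr raises ValueError on negative arguments).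
def convert2ascii (string : String) (num : Int) : String :=
  string.toList.foldl
    (fun blank c => blank.push (Char.ofNat (pyWhileReduce ((c.toNat : Int) + num)).toNat))
    ""

-- ===== PORT B =====
def convert2ascii_alt (string : String) (num : Int) : String :=
  String.ofList (string.toList.map (fun c =>
    let v : Int := (c.toNat : Int) + num
    Char.ofNat (if v ≤ 122 then v else 97 + PySem.Int.mod (v - 97) 26).toNat))

-- ===== PRECONDITION & SPEC =====
-- Pre_ excludes exactly the inputs where Python's chr raises ValueError:
-- some shifted code ord(c)+num is negative (it is then ≤ 122, so the while
-- loop leaves it negative and chr raises).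
def Pre_convert2ascii (string : String) (num : Int) : Prop :=
  (string.toList.all (fun c => decide (0 ≤ (c.toNat : Int) + num))) = true
instance (string : String) (num : Int) : Decidable (Pre_convert2ascii string num) := by
  unfold Pre_convert2ascii; infer_instance
def pvWitness_convert2ascii : String × Int := ("ab", 7)

def Spec_convert2ascii (string : String) (num : Int) (out : String) : Prop := out = convert2ascii_alt string num
instance (string : String) (num : Int) (out : String) : Decidable (Spec_convert2ascii string num out) := by unfold Spec_convert2ascii; infer_instance

-- ===== CLAIM (what is proved, stated in full; the proofs are below) =====
def Claim_equal_convert2ascii : Prop := ∀ (string : String) (num : Int), Dom_convert2ascii string num → Pre_convert2ascii string num → Spec_convert2ascii string num (convert2ascii string num)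

-- ===== LEMMAS AND PROOFS =====

-- the while loop computes the closed form, for every v
theorem pyWhileReduce_closed (v : Int) :
    pyWhileReduce v = if v ≤ 122 then v else 97 + PySem.Int.mod (v - 97) 26 := by
  induction v using pyWhileReduce.induct with
  | case1 v h ih =>
    rw [pyWhileReduce, dif_pos h, ih]
    simp only [PySem.Int.mod_eq_emod_of_pos (show (0:Int) < 26 by norm_num)]
    split_ifs <;> omega
  | case2 v h =>
    rw [pyWhileReduce, dif_neg h, if_pos (by omega)]

theorem foldl_push_eq (l : List Char) (f : Char → Char) (acc : List Char) :
    l.foldl (fun b c => b.push (f c)) (String.ofList acc) = String.ofList (acc ++ l.map f) := by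
  induction l generalizing acc with
  | nil => simp
  | cons c t ih =>
    have hp : (String.ofList acc).push (f c) = String.ofList (acc ++ [f c]) := by
      apply String.toList_injective; simp
    simp only [List.foldl, List.map, hp, ih, List.append_assoc, List.singleton_append]

-- ===== VERDICT (by name: the statement is the Claim_ definition above) =====
theorem convert2ascii_spec : Claim_equal_convert2ascii := by
  intro s num _ _
  unfold Spec_convert2ascii convert2ascii convert2ascii_alt
  rw [show ("" : String) = String.ofList [] from rfl, foldl_push_eq]
  simp only [List.nil_append, pyWhileReduce_closed]
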